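-- pv_equiv track=rewrite | github.com/optapy/optapy | python-to-java-translator/src/main/python/python_to_java_bytecode_translator.py | is_banned_module
-- ===== SOURCE A (Python) =====
-- def is_banned_module(module: str):
--     banned_modules = {'jpype', 'importlib', 'pytest'}
--     for banned_module in banned_modules:
--         if module == banned_module:
--             return True
--         elif module == f'_{banned_module}':
--             return True
--         elif module.startswith(f'{banned_module}.'):
--             return True
--         elif module.startswith(f'_{banned_module}.'):
--             return True
--     return False
-- ===== SOURCE B (Python) =====
-- def _strip(module):
--     return module[1:] if module.startswith('_') else module
--
--
-- def _head(s):
--     dot = s.find('.')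
--     return s if dot == -1 else s[:dot]
--
--
-- def is_banned_module(module: str):
--     head = _head(_strip(module))
--     return head in ('jpype', 'importlib', 'pytest')
-- ===== Notes on version B (the rewrite author's own statement) =====
-- stated objective: simpler
-- what changed: B normalizes the input (drops exactly one leading underscore, then takes the segment before the first dot) and does a single membership test, replacing A's loop that tests four string conditions per banned name.
import Mathlib
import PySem

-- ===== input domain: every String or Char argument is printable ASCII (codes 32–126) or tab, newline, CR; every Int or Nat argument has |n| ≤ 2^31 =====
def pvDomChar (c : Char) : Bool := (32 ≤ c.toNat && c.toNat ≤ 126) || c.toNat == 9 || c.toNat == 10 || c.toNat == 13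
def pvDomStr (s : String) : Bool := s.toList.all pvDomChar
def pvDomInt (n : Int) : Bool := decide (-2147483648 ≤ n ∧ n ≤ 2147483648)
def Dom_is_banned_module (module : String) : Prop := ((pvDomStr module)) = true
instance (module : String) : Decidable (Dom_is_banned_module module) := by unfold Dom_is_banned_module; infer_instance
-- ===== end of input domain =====

-- B normalizes the input (one leading '_' dropped, segment before the first '.')
-- and does one membership test, instead of A's four string tests per banned name; objective: simpler.

-- ===== PORT A =====
-- the for-loop over the banned set: returns True on the first banned name matching one of the four conditions
def bannedLoop (m : List Char) : List (List Char) → Bool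
  | [] => false
  | b :: rest =>
    if m == b then true
    else if m == '_' :: b then true
    else if PySem.Chars.startswith m (b ++ ['.']) then true
    else if PySem.Chars.startswith m ('_' :: (b ++ ['.'])) then true
    else bannedLoop m rest

def is_banned_module (module : String) : Bool :=
  bannedLoop module.toList
    [['j','p','y','p','e'], ['i','m','p','o','r','t','l','i','b'], ['p','y','t','e','s','t']]

-- ===== PORT B =====
-- module[1:] if module.startswith('_') else module
def pvStrip (cs : List Char) : List Char :=
  if PySem.Chars.startswith cs ['_'] then PySem.List.slice cs (some 1) none else cs

-- s if s.find('.') == -1 else s[:s.find('.')]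
def pvHead (s : List Char) : List Char :=
  let dot := PySem.Chars.find s ['.']
  if dot == -1 then s else PySem.List.slice s none (some dot)

def is_banned_module_alt (module : String) : Bool :=
  let head := pvHead (pvStrip module.toList)
  head == ['j','p','y','p','e'] || head == ['i','m','p','o','r','t','l','i','b'] ||
    head == ['p','y','t','e','s','t']

-- ===== PRECONDITION & SPEC =====
def Spec_is_banned_module (module : String) (out : Bool) : Prop := out = is_banned_module_alt module
instance (module : String) (out : Bool) : Decidable (Spec_is_banned_module module out) := by unfold Spec_is_banned_module; infer_instance

-- ===== CLAIM (what is proved, stated in full; the proofs are below) =====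
def Claim_equal_is_banned_module : Prop := ∀ (module : String), Dom_is_banned_module module → Spec_is_banned_module module (is_banned_module module)

-- ===== LEMMAS AND PROOFS =====

-- pvHead picks out the prefix before the first '.', so for a nonempty dot-free b
-- it equals b exactly when the whole string is b or b followed by '.'
lemma pvHead_eq_iff (cs b : List Char) (hb : b ≠ []) (hdot : ('.' : Char) ∉ b) :
    pvHead cs = b ↔ cs = b ∨ b ++ ['.'] <+: cs := by
  simp only [pvHead]
  by_cases hf : PySem.Chars.find cs ['.'] = -1
  · have hni : ¬ (['.'] <:+: cs) := (PySem.Chars.find_eq_neg_one_iff cs ['.']).mp hf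
    simp only [hf, BEq.rfl, if_true]
    constructor
    · exact Or.inl
    · rintro (h | h)
      · exact h
      · exact absurd ((List.suffix_append b ['.']).isInfix.trans h.isInfix) hni
  · have hge : (0:Int) ≤ PySem.Chars.find cs ['.'] := by
      have := PySem.Chars.neg_one_le_find cs ['.']
      omega
    obtain ⟨hpre, hmin⟩ := PySem.Chars.find_spec (s := cs) (sub := ['.']) hge
    have hcond : (PySem.Chars.find cs ['.'] == -1) = false := by
      simpa using hf
    simp only [hcond, Bool.false_eq_true, if_false]
    rw [PySem.List.slice_to cs hge]
    set n := (PySem.Chars.find cs ['.']).toNat with hn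
    obtain ⟨t, ht⟩ := hpre
    constructor
    · intro h
      right
      refine ⟨t, ?_⟩
      have hsplit : cs = List.take n cs ++ List.drop n cs := (List.take_append_drop n cs).symm
      rw [h, ← ht] at hsplit
      simpa [List.append_assoc] using hsplit.symm
    · rintro (rfl | ⟨u, hu⟩)
      · exfalso
        have hmem : ('.' : Char) ∈ List.drop n cs := by
          rw [← ht]; simp
        exact hdot (List.mem_of_mem_drop hmem)
      · have hdropb : List.drop b.length cs = ['.'] ++ u := by
          rw [← hu, List.append_assoc, List.drop_left]
        have hle : n ≤ b.length := by
          by_contra hlt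
          exact hmin b.length (by omega) ⟨u, hdropb.symm⟩
        have hge2 : b.length ≤ n := by
          by_contra hlt
          push_neg at hlt
          have hdn : List.drop n cs = List.drop n b ++ (['.'] ++ u) := by
            rw [← hu, List.append_assoc, List.drop_append_of_le_length (by omega)]
          obtain ⟨x, bs, hxbs⟩ := List.exists_cons_of_ne_nil
            (l := List.drop n b) (by rw [ne_eq, List.drop_eq_nil_iff]; omega)
          have hx : x = '.' := by
            have heq := hdn
            rw [hxbs, ← ht] at heq
            have hhd := congrArg List.head? heq
            simpa using hhd.symm
          have hxmem : x ∈ List.drop n b := by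
            rw [hxbs]
            exact List.mem_cons_self
          exact hdot (hx ▸ List.mem_of_mem_drop hxmem)
        have hnb : n = b.length := le_antisymm hle hge2
        rw [hnb, ← hu, List.append_assoc, List.take_left]

-- one group of A's four tests equals B's normalized test, for a banned name x::bs
-- that is dot-free and does not start with '_'
lemma group_core (cs : List Char) (x : Char) (bs : List Char)
    (hx : x ≠ '_') (hdot : ('.' : Char) ∉ x :: bs) :
    (((cs = x :: bs ∨ cs = '_' :: x :: bs) ∨ (x :: bs) ++ ['.'] <+: cs) ∨
      '_' :: ((x :: bs) ++ ['.']) <+: cs) ↔ pvHead (pvStrip cs) = x :: bs := by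
    rw [pvHead_eq_iff _ _ (by simp) hdot]
    unfold pvStrip
    rcases cs with _ | ⟨c, t⟩
    · have h0 : PySem.Chars.startswith ([] : List Char) ['_'] = false := by
        rw [Bool.eq_false_iff]
        intro h
        have := (PySem.Chars.startswith_iff _ _).mp h
        simp at this
      rw [h0]
      simp
    · by_cases hc : c = '_'
      · subst hc
        have h1 : PySem.Chars.startswith ('_' :: t) ['_'] = true :=
          (PySem.Chars.startswith_iff _ _).mpr ⟨t, rfl⟩
        rw [h1]
        simp only [if_true, PySem.List.slice_from_one, List.tail_cons]
        have hx1 : ('_' : Char) ≠ x := Ne.symm hx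
        simp only [List.cons_prefix_cons, List.cons_append, List.cons.injEq, hx, hx1,
          false_and, false_or, or_false, true_and]
      · have h0 : PySem.Chars.startswith (c :: t) ['_'] = false := by
          rw [Bool.eq_false_iff]
          intro h
          obtain ⟨m, hm⟩ := (PySem.Chars.startswith_iff _ _).mp h
          exact hc (by simpa using congrArg List.head? hm.symm)
        rw [h0]
        simp only [Bool.false_eq_true, if_false]
        have hc1 : ('_' : Char) ≠ c := fun h => hc h.symm
        simp only [List.cons_prefix_cons, List.cons_append, List.cons.injEq, hc, hc1,
          false_and, or_false]

-- group_core with a trailing disjunct, for rewriting inside the or-chain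
lemma group_iff (cs : List Char) (x : Char) (bs : List Char) (r : Prop)
    (hx : x ≠ '_') (hdot : ('.' : Char) ∉ x :: bs) :
    ((((cs = x :: bs ∨ cs = '_' :: x :: bs) ∨ (x :: bs) ++ ['.'] <+: cs) ∨
      '_' :: ((x :: bs) ++ ['.']) <+: cs) ∨ r) ↔ (pvHead (pvStrip cs) = x :: bs ∨ r) := by
  have h := group_core cs x bs hx hdot
  tauto

lemma bannedLoop_nil (m : List Char) : bannedLoop m [] = false := rfl

lemma bannedLoop_cons (m b : List Char) (rest : List (List Char)) :
    bannedLoop m (b :: rest) =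
      (m == b || m == '_' :: b || PySem.Chars.startswith m (b ++ ['.']) ||
        PySem.Chars.startswith m ('_' :: (b ++ ['.'])) || bannedLoop m rest) := by
  simp only [bannedLoop]
  split_ifs <;> simp_all

-- ===== VERDICT (by name: the statement is the Claim_ definition above) =====
theorem is_banned_module_spec : Claim_equal_is_banned_module := by
  intro module _
  unfold Spec_is_banned_module is_banned_module is_banned_module_alt
  rw [Bool.eq_iff_iff]
  simp only [bannedLoop_cons, bannedLoop_nil, Bool.or_false, Bool.or_eq_true, beq_iff_eq,
    PySem.Chars.startswith_iff]
  rw [group_iff _ 'j' ['p','y','p','e'] _ (by decide) (by decide),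
      group_iff _ 'i' ['m','p','o','r','t','l','i','b'] _ (by decide) (by decide),
      group_core _ 'p' ['y','t','e','s','t'] (by decide) (by decide)]
  tauto
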